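-- pv_equiv track=rewrite | github.com/kelhad00/CBA-toolkit | interaction_analysis.py | get_prev_n_exp
-- ===== SOURCE A (Python) =====
-- def get_prev_n_exp(lst, n, max_distance, append_none = True):
--     dct = {}
--     for l in range(n, len(lst)):#skip the first n elements (cannot assume they are None)
--         lab = lst[l][2]
--         if lab not in dct:
--             dct[lab] = []
--         temp = []
--         for ind_next in range(1,n+1):
--             prev_close = lst[l-ind_next+1][0]
--             prev_far = lst[l-ind_next][1]
--             if (prev_close-prev_far)<=max_distance:
--                 temp.append (lst[l-ind_next][2])
--             else:
--                 if append_none: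
--                     temp.extend([None]*(n-ind_next+1))
--                 break
--         if len(temp)==n:
--             dct[lab].append(temp)
--     return dct
-- ===== SOURCE B (Python) =====
-- def get_prev_n_exp(lst, n, max_distance, append_none=True):
--     m = len(lst)
--     # adjacency: gap_ok[j] says the gap between lst[j] and lst[j+1] is small enough
--     gap_ok = [lst[j + 1][0] - lst[j][1] <= max_distance for j in range(m - 1)]
--     # cnt[i] = number of consecutive ok gaps immediately before index i
--     cnt = [0]
--     for i in range(1, m):
--         cnt.append(cnt[i - 1] + 1 if gap_ok[i - 1] else 0)
--     dct = {}
--     for l in range(n, m):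
--         dct.setdefault(lst[l][2], [])
--         k = min(cnt[l], n)
--         temp = [lst[l - 1 - t][2] for t in range(k)]
--         if append_none:
--             temp += [None] * (n - k)
--         if len(temp) == n:
--             dct[lst[l][2]].append(temp)
--     return dct
-- ===== Notes on version B (the rewrite author's own statement) =====
-- stated objective: alternative
-- what changed: A rescans backwards from every element with a break/pad inner loop; B precomputes a run-length table cnt[i] of consecutive within-distance gaps once and builds each previous-label window directly from k = min(cnt[l], n).
import Mathlib
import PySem

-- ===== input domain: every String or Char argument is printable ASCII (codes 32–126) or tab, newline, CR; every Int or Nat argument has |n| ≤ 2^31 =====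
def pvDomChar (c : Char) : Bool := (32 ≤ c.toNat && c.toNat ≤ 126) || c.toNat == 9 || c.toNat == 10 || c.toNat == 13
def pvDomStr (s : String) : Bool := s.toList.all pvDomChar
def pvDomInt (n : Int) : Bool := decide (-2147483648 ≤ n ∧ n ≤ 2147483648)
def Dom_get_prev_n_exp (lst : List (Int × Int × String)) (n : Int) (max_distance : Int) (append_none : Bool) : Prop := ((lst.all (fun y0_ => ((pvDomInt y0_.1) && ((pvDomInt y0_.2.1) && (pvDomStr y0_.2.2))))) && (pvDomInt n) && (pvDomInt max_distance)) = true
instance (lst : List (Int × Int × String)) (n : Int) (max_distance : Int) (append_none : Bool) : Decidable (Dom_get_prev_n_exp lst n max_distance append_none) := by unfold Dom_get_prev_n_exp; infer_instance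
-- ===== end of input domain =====

-- B replaces A's per-element backwards gap-rescan (with its break/pad control flow) by a
-- precomputed run-length table of consecutive valid gaps; same results, similar cost (objective: alternative).

-- shared total indexer: lst[i] (Python semantics; in range for every access the claim covers)
def pvItem (lst : List (Int × Int × String)) (i : Int) : Int × Int × String :=
  (PySem.List.pyGet? lst i).getD (0, 0, "")

-- ===== PORT A =====
-- inner 'for ind_next in range(1, n+1)' loop of A, with its break/pad
def pvTempA (lst : List (Int × Int × String)) (n max_distance l : Int) (append_none : Bool) :
    List Int → List (Option String) → List (Option String)
  | [], temp => temp
  | ind_next :: rest, temp =>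
    if (pvItem lst (l - ind_next + 1)).1 - (pvItem lst (l - ind_next)).2.1 ≤ max_distance then
      pvTempA lst n max_distance l append_none rest (temp ++ [some (pvItem lst (l - ind_next)).2.2])
    else if append_none then temp ++ List.replicate (n - ind_next + 1).toNat none
    else temp

def pvLoopA (lst : List (Int × Int × String)) (n max_distance : Int) (append_none : Bool) :
    List Int → PySem.Dict String (List (List (Option String))) → PySem.Dict String (List (List (Option String)))
  | [], dct => dct
  | l :: rest, dct =>
    let lab := (pvItem lst l).2.2
    let dct1 := if dct.contains lab then dct else dct.insert lab []
    let temp := pvTempA lst n max_distance l append_none (PySem.List.pyRange 1 (n + 1) 1) []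
    let dct2 := if (temp.length : Int) = n then dct1.modify lab [] (· ++ [temp]) else dct1
    pvLoopA lst n max_distance append_none rest dct2

def get_prev_n_exp (lst : List (Int × Int × String)) (n : Int) (max_distance : Int) (append_none : Bool) : List (String × List (List (Option String))) :=
  (pvLoopA lst n max_distance append_none (PySem.List.pyRange n (lst.length : Int) 1) PySem.Dict.empty).items

-- ===== PORT B =====
-- gap_ok[j] of Source B: the gap between lst[j] and lst[j+1] is within max_distance
def pvGapOk (lst : List (Int × Int × String)) (max_distance j : Int) : Bool :=
  decide ((pvItem lst (j + 1)).1 - (pvItem lst j).2.1 ≤ max_distance)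

def pvLoopB (lst : List (Int × Int × String)) (n max_distance : Int) (append_none : Bool) (cnt : List Int) :
    List Int → PySem.Dict String (List (List (Option String))) → PySem.Dict String (List (List (Option String)))
  | [], dct => dct
  | l :: rest, dct =>
    let dct1 := dct.setdefault (pvItem lst l).2.2 []
    let k := min (PySem.List.pyGetD cnt l 0) n
    let temp0 := (PySem.List.pyRange 0 k 1).map (fun t => some (pvItem lst (l - 1 - t)).2.2)
    let temp := if append_none then temp0 ++ List.replicate (n - k).toNat none else temp0
    let dct2 := if (temp.length : Int) = n then dct1.modify (pvItem lst l).2.2 [] (· ++ [temp]) else dct1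
    pvLoopB lst n max_distance append_none cnt rest dct2

def get_prev_n_exp_alt (lst : List (Int × Int × String)) (n : Int) (max_distance : Int) (append_none : Bool) : List (String × List (List (Option String))) :=
  let m : Int := (lst.length : Int)
  let gap_ok : List Bool := (PySem.List.pyRange 0 (m - 1) 1).map (pvGapOk lst max_distance)
  let cnt : List Int := (PySem.List.pyRange 1 m 1).foldl
    (fun c i => c ++ [if PySem.List.pyGetD gap_ok (i - 1) false then PySem.List.pyGetD c (i - 1) 0 + 1 else 0]) [0]
  (pvLoopB lst n max_distance append_none cnt (PySem.List.pyRange n m 1) PySem.Dict.empty).items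

-- ===== PRECONDITION & SPEC =====
-- Pre_ excludes exactly the inputs where the Python A raises IndexError: n < -len(lst)
-- makes the very first iteration read lst[n] out of range.
def Pre_get_prev_n_exp (lst : List (Int × Int × String)) (n : Int) (max_distance : Int) (append_none : Bool) : Prop :=
  -(lst.length : Int) ≤ n
instance (lst : List (Int × Int × String)) (n : Int) (max_distance : Int) (append_none : Bool) : Decidable (Pre_get_prev_n_exp lst n max_distance append_none) := by unfold Pre_get_prev_n_exp; infer_instance

def pvWitness_get_prev_n_exp : (List (Int × Int × String)) × Int × Int × Bool :=
  ([(0, 1, "x"), (2, 3, "y"), (9, 9, "x")], 1, 2, true)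

def Spec_get_prev_n_exp (lst : List (Int × Int × String)) (n : Int) (max_distance : Int) (append_none : Bool) (out : List (String × List (List (Option String)))) : Prop := out = get_prev_n_exp_alt lst n max_distance append_none
instance (lst : List (Int × Int × String)) (n : Int) (max_distance : Int) (append_none : Bool) (out : List (String × List (List (Option String)))) : Decidable (Spec_get_prev_n_exp lst n max_distance append_none out) := by unfold Spec_get_prev_n_exp; infer_instance

-- ===== CLAIM (what is proved, stated in full; the proofs are below) =====
def Claim_equal_get_prev_n_exp : Prop := ∀ (lst : List (Int × Int × String)) (n : Int) (max_distance : Int) (append_none : Bool), Dom_get_prev_n_exp lst n max_distance append_none → Pre_get_prev_n_exp lst n max_distance append_none → Spec_get_prev_n_exp lst n max_distance append_none (get_prev_n_exp lst n max_distance append_none)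

-- ===== LEMMAS AND PROOFS =====

-- run-length of consecutive ok gaps ending just before index i (the value cnt[i] of Source B)
def pvRun (lst : List (Int × Int × String)) (max_distance : Int) : Nat → Int
  | 0 => 0
  | i + 1 => if pvGapOk lst max_distance i then pvRun lst max_distance i + 1 else 0

lemma pvRun_nonneg (lst : List (Int × Int × String)) (md : Int) (i : Nat) : 0 ≤ pvRun lst md i := by
  induction i with
  | zero => simp [pvRun]
  | succ i ih => simp only [pvRun]; split <;> omega

lemma pvRun_le (lst : List (Int × Int × String)) (md : Int) (i : Nat) : pvRun lst md i ≤ (i : Int) := by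
  induction i with
  | zero => simp [pvRun]
  | succ i ih => simp only [pvRun]; push_cast; split <;> omega

lemma pvRun_ok (lst : List (Int × Int × String)) (md : Int) (i : Nat) :
    ∀ j : Int, 1 ≤ j → j ≤ pvRun lst md i → pvGapOk lst md ((i : Int) - j) = true := by
  induction i with
  | zero => intro j h1 h2; have := pvRun_le lst md 0; simp [pvRun] at h2; omega
  | succ i ih =>
    intro j h1 h2
    simp only [pvRun] at h2
    by_cases hok : pvGapOk lst md i = true
    · rw [hok] at h2; simp at h2
      rcases eq_or_lt_of_le h1 with h | h
      · have : ((i : Nat) + 1 : Int) - j = (i : Int) := by push_cast; omega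
        push_cast
        rw [show ((i : Int) + 1) - j = (i : Int) from by omega]
        exact hok
      · have h2' : j - 1 ≤ pvRun lst md i := by omega
        have := ih (j - 1) (by omega) h2'
        push_cast
        rw [show ((i : Int) + 1) - j = (i : Int) - (j - 1) from by omega]
        exact this
    · simp only [Bool.not_eq_true] at hok; rw [hok] at h2; simp at h2; omega

lemma pvRun_stop (lst : List (Int × Int × String)) (md : Int) (i : Nat)
    (h : pvRun lst md i < (i : Int)) :
    pvGapOk lst md ((i : Int) - pvRun lst md i - 1) = false := by
  induction i with
  | zero => simp at h; have := pvRun_nonneg lst md 0; omega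
  | succ i ih =>
    by_cases hok : pvGapOk lst md i = true
    · simp only [pvRun, hok, if_pos] at h ⊢
      push_cast at h ⊢
      have h' : pvRun lst md i < (i : Int) := by omega
      have := ih h'
      rw [show (i : Int) + 1 - (pvRun lst md i + 1) - 1 = (i : Int) - pvRun lst md i - 1 from by omega]
      exact this
    · simp only [Bool.not_eq_true] at hok
      simp only [pvRun, hok, if_neg, Bool.false_eq_true, not_false_iff]
      push_cast
      rw [show (i : Int) + 1 - 0 - 1 = (i : Int) from by omega]
      exact hok

-- the cnt list built by Source B's fold is the table of pvRun values
lemma pvCnt_eq (lst : List (Int × Int × String)) (md : Int) (M : Nat) (hM : 1 ≤ M)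
    (hMm : M ≤ lst.length) :
    (PySem.List.pyRange 1 (M : Int) 1).foldl
      (fun c i => c ++ [if PySem.List.pyGetD
          ((PySem.List.pyRange 0 ((lst.length : Int) - 1) 1).map (pvGapOk lst md)) (i - 1) false
        then PySem.List.pyGetD c (i - 1) 0 + 1 else 0]) [0]
      = (List.range M).map (pvRun lst md) := by
  induction M with
  | zero => omega
  | succ M ih =>
    rcases Nat.lt_or_ge M 1 with h1 | h1
    · interval_cases M
      simp [PySem.List.pyRange_one_eq_nil, List.range_succ, pvRun]
    · obtain ⟨k, rfl⟩ : ∃ k, M = k + 1 := ⟨M - 1, by omega⟩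
      have hMm' : k + 1 ≤ lst.length := by omega
      have hcast : ((k + 1 + 1 : Nat) : Int) = ((k + 1 : Nat) : Int) + 1 := by push_cast; ring
      rw [hcast, PySem.List.pyRange_one_succ_right (by push_cast; omega), List.foldl_append,
        ih h1 hMm']
      simp only [List.foldl]
      conv_rhs => rw [List.range_succ]
      rw [List.map_append]
      congr 1
      have h1' : ((k + 1 : Nat) : Int) - 1 = (k : Int) := by push_cast; ring
      have hlen1 : ((lst.length : Int) - 1) = ((lst.length - 1 : Nat) : Int) := by omega
      rw [h1', hlen1, PySem.List.pyRange_zero_natCast, List.map_map,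
        PySem.List.pyGetD_natCast, PySem.List.pyGetD_natCast,
        PySem.List.getD_map_range _ _ _ _ (by omega),
        PySem.List.getD_map_range _ _ _ _ (by omega)]
      simp [pvRun, Function.comp]

-- what A's inner loop computes, in terms of the run length k = min(cnt[l], n)
lemma pvTempA_char (lst : List (Int × Int × String)) (n md l : Int) (an : Bool) (k : Int)
    (hk0 : 0 ≤ k) (hkn : k ≤ n)
    (hok : ∀ j : Int, 1 ≤ j → j ≤ k → pvGapOk lst md (l - j) = true)
    (hstop : k < n → pvGapOk lst md (l - k - 1) = false) :
    ∀ (fuel : Nat) (j : Int) (acc : List (Option String)), 1 ≤ j → j + fuel = n + 1 → j ≤ k + 1 →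
    pvTempA lst n md l an (PySem.List.pyRange j (n + 1) 1) acc
      = acc ++ (PySem.List.pyRange j (k + 1) 1).map (fun i => some (pvItem lst (l - i)).2.2)
        ++ (if k < n then (if an then List.replicate (n - k).toNat none else []) else []) := by
  intro fuel
  induction fuel with
  | zero =>
    intro j acc h1 h2 h3
    have hj : j = n + 1 := by omega
    subst hj
    have hkn' : k = n := by omega
    subst hkn'
    simp [pvTempA, PySem.List.pyRange_one_eq_nil le_rfl]
  | succ fuel ih =>
    intro j acc h1 h2 h3
    have hj : j < n + 1 := by omega
    rw [PySem.List.pyRange_one_cons hj]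
    simp only [pvTempA]
    by_cases hcase : j ≤ k
    · have hokj : pvGapOk lst md (l - j) = true := hok j h1 hcase
      rw [if_pos (by exact of_decide_eq_true hokj)]
      rw [ih (j + 1) (acc ++ [some (pvItem lst (l - j)).2.2]) (by omega) (by push_cast at h2 ⊢; omega) (by omega)]
      rw [PySem.List.pyRange_one_cons (by omega : j < k + 1), List.map_cons]
      simp [List.append_assoc]
    · have hj2 : j = k + 1 := by omega
      subst hj2
      have hkltn : k < n := by omega
      have hfail : pvGapOk lst md (l - (k + 1)) = false := by
        rw [show l - (k + 1) = l - k - 1 from by ring]; exact hstop hkltn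
      rw [if_neg (by simpa using of_decide_eq_false hfail)]
      rw [show n - (k + 1) + 1 = n - k from by ring]
      cases an <;> simp [PySem.List.pyRange_one_eq_nil le_rfl, hkltn]

lemma tempA_eq_tempB (lst : List (Int × Int × String)) (n md l : Int) (an : Bool)
    (cnt : List Int) (hcnt : ∀ x ∈ cnt, 0 ≤ x)
    (hlook : 1 ≤ n → PySem.List.pyGetD cnt l 0 = pvRun lst md l.toNat)
    (hnl : n ≤ l) (hlm : l < (lst.length : Int)) :
    pvTempA lst n md l an (PySem.List.pyRange 1 (n + 1) 1) []
      = (let k := min (PySem.List.pyGetD cnt l 0) n;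
         let temp0 := (PySem.List.pyRange 0 k 1).map (fun t => some (pvItem lst (l - 1 - t)).2.2);
         if an then temp0 ++ List.replicate (n - k).toNat none else temp0) := by
  have hc0 : 0 ≤ PySem.List.pyGetD cnt l 0 := by
    simp only [PySem.List.pyGetD]
    cases h : PySem.List.pyGet? cnt l with
    | none => simp
    | some x => simpa using hcnt x (PySem.List.mem_of_pyGet?_eq_some _ h)
  by_cases hn : 1 ≤ n
  · have hl0 : 0 ≤ l := by omega
    have hlcast : (l.toNat : Int) = l := Int.toNat_of_nonneg hl0
    rw [hlook hn]
    set k : Int := min (pvRun lst md l.toNat) n with hkdef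
    have hrun0 := pvRun_nonneg lst md l.toNat
    have hk0 : 0 ≤ k := by omega
    have hkn : k ≤ n := by omega
    have hok : ∀ j : Int, 1 ≤ j → j ≤ k → pvGapOk lst md (l - j) = true := by
      intro j h1 h2
      have := pvRun_ok lst md l.toNat j h1 (by omega)
      rwa [hlcast] at this
    have hstop : k < n → pvGapOk lst md (l - k - 1) = false := by
      intro hlt
      have hkr : k = pvRun lst md l.toNat := by omega
      have hrl : pvRun lst md l.toNat < (l.toNat : Int) := by omega
      have := pvRun_stop lst md l.toNat hrl
      rw [hlcast] at this
      rw [hkr]; exact this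
    have := pvTempA_char lst n md l an k hk0 hkn hok hstop n.toNat 1 []
      (le_refl 1) (by omega) (by omega)
    rw [this]
    have hmaps : (PySem.List.pyRange 1 (k + 1) 1).map (fun i => some (pvItem lst (l - i)).2.2)
        = (PySem.List.pyRange 0 k 1).map (fun t => some (pvItem lst (l - 1 - t)).2.2) := by
      rw [PySem.List.pyRange_one 1 (k + 1), PySem.List.pyRange_one 0 k, List.map_map, List.map_map]
      rw [show (k + 1 - 1).toNat = (k - 0).toNat from by omega]
      refine List.map_congr_left ?_
      intro t _
      simp only [Function.comp]
      rw [show l - (1 + (t : Int)) = l - 1 - (0 + (t : Int)) from by ring]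
    rw [hmaps]
    by_cases hkltn : k < n
    · cases an <;> simp [hkltn]
    · have hkeq : k = n := by omega
      cases an <;> simp [hkeq]
  · have hkn : min (PySem.List.pyGetD cnt l 0) n = n := by omega
    have h1 : PySem.List.pyRange 1 (n + 1) 1 = [] := PySem.List.pyRange_one_eq_nil (by omega)
    have h2 : PySem.List.pyRange 0 n 1 = [] := PySem.List.pyRange_one_eq_nil (by omega)
    cases an <;> simp [pvTempA, hkn, h1, h2]

lemma loops_eq (lst : List (Int × Int × String)) (n md : Int) (an : Bool) (cnt : List Int)
    (ls : List Int) (dct : PySem.Dict String (List (List (Option String))))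
    (h : ∀ l ∈ ls, pvTempA lst n md l an (PySem.List.pyRange 1 (n + 1) 1) []
        = (let k := min (PySem.List.pyGetD cnt l 0) n;
           let temp0 := (PySem.List.pyRange 0 k 1).map (fun t => some (pvItem lst (l - 1 - t)).2.2);
           if an then temp0 ++ List.replicate (n - k).toNat none else temp0)) :
    pvLoopA lst n md an ls dct = pvLoopB lst n md an cnt ls dct := by
  induction ls generalizing dct with
  | nil => rfl
  | cons l rest ih =>
    simp only [pvLoopA, pvLoopB]
    rw [← h l (List.mem_cons_self)]
    by_cases hc : dct.contains (pvItem lst l).2.2 = true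
    · rw [PySem.Dict.setdefault_of_contains _ _ hc, if_pos hc]
      exact ih _ (fun x hx => h x (List.mem_cons_of_mem _ hx))
    · rw [PySem.Dict.setdefault_of_not_contains _ _ (by simpa using hc), if_neg hc]
      exact ih _ (fun x hx => h x (List.mem_cons_of_mem _ hx))

-- ===== VERDICT (by name: the statement is the Claim_ definition above) =====
theorem get_prev_n_exp_spec : Claim_equal_get_prev_n_exp := by
  intro lst n md an _ _
  simp only [Spec_get_prev_n_exp, get_prev_n_exp, get_prev_n_exp_alt]
  apply congrArg PySem.Dict.items
  apply loops_eq
  intro l hl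
  rw [PySem.List.mem_pyRange_one] at hl
  rcases Nat.eq_zero_or_pos lst.length with h0 | hpos
  · have hnil : PySem.List.pyRange 1 ((lst.length : Int)) 1 = [] :=
      PySem.List.pyRange_one_eq_nil (by omega)
    rw [hnil]
    simp only [List.foldl_nil]
    refine tempA_eq_tempB lst n md l an [0] ?_ ?_ hl.1 hl.2
    · intro x hx; simp at hx; omega
    · intro hn; exfalso
      have := hl.1
      have := hl.2
      omega
  · refine tempA_eq_tempB lst n md l an _ ?_ ?_ hl.1 hl.2
    · rw [pvCnt_eq lst md lst.length hpos le_rfl]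
      intro x hx
      obtain ⟨i, _, rfl⟩ := List.mem_map.mp hx
      exact pvRun_nonneg lst md i
    · intro hn
      rw [pvCnt_eq lst md lst.length hpos le_rfl]
      have hl0 : 0 ≤ l := by omega
      have hlt : l.toNat < lst.length := by omega
      rw [← Int.toNat_of_nonneg hl0, PySem.List.pyGetD_natCast,
        PySem.List.getD_map_range _ _ _ _ hlt, Int.toNat_natCast]
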